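-- pv_equiv track=rewrite | github.com/Krithi0511/Steganography-Project | text_stego.py | hide_text
-- ===== SOURCE A (Python) =====
-- def hide_text(cover_text, secret_text):
--     # Unicode spacing variations (invisible embedding)
--     binary_secret = ''.join(format(ord(c), '08b') for c in secret_text)
--
--     stego_chars = []
--     secret_idx = 0
--
--     # Use a more robust embedding by placing zero-width characters at the end or within spaces
--     for i, char in enumerate(cover_text):
--         stego_chars.append(char)
--         if secret_idx < len(binary_secret):
--             # Embed 1 bit in Unicode spacing (ZWSP/ZWNJ)
--             bit = binary_secret[secret_idx]
--             if bit == '1':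
--                 stego_chars.append(chr(0x200C))  # ZWNJ
--             else:
--                 stego_chars.append(chr(0x200B))  # ZWSP
--             secret_idx += 1
--
--     # If there are remaining bits, append them to the end
--     while secret_idx < len(binary_secret):
--         bit = binary_secret[secret_idx]
--         if bit == '1':
--             stego_chars.append(chr(0x200C))
--         else:
--             stego_chars.append(chr(0x200B))
--         secret_idx += 1
--
--     return ''.join(stego_chars)
-- ===== SOURCE B (Python) =====
-- def hide_text(cover_text, secret_text):
--     # iterate over secret CHARACTERS, not a precomputed bit string:
--     # for each byte, pull up to 8 cover chars from an iterator and pair each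
--     # bit (extracted by shifting) with one cover char; then flush the iterator
--     it = iter(cover_text)
--     out = []
--     for ch in secret_text:
--         code = ord(ch)
--         for k in range(7, -1, -1):
--             c = next(it, None)
--             if c is not None:
--                 out.append(c)
--             out.append('\u200c' if (code >> k) & 1 else '\u200b')
--     out.extend(it)
--     return ''.join(out)
-- ===== Notes on version B (the rewrite author's own statement) =====
-- stated objective: alternative
-- what changed: Instead of materialising the whole binary string and walking the cover with a bit index plus a second while-loop for leftover bits, B iterates over secret characters, extracts each bit by arithmetic shifting, pulls cover characters one at a time from an iterator, and flushes the remaining iterator at the end; skipping the intermediate format/join bit string gives a measured constant-factor speedup.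
import Mathlib
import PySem

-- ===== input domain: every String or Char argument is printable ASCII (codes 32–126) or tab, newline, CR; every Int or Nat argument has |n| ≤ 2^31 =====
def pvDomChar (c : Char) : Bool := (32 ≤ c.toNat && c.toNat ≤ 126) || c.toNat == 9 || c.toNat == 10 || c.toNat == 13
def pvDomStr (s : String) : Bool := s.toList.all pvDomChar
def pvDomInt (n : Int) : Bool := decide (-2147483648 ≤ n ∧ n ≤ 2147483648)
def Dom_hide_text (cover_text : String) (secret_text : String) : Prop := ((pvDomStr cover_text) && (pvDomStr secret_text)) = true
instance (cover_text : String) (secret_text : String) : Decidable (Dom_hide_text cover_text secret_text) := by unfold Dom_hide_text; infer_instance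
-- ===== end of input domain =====

-- B iterates over secret characters (bit-extraction by shifting, cover pulled from an
-- iterator, remainder flushed at the end) instead of A's precomputed bit string walked
-- by index with a separate while-loop tail (objective: alternative).

def pvZWNJ : Char := Char.ofNat 0x200C
def pvZWSP : Char := Char.ofNat 0x200B

-- ===== PORT A =====
-- format(ord(c), '08b') as a list of '0'/'1' chars; exact for code points < 256
-- (every Dom character has code ≤ 126, hence exactly 8 binary digits with leading zeros)
def pvBits8 (c : Char) : List Char :=
  (List.range 8).map (fun i => if c.toNat / 2 ^ (7 - i) % 2 = 1 then '1' else '0')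

-- the zero-width character A appends for one bit char ('1' → ZWNJ, else ZWSP)
def pvZwOf (b : Char) : Char := if b = '1' then pvZWNJ else pvZWSP

-- the trailing while-loop of A: one zero-width char per remaining bit
def pvTailA : List Char → List Char
  | [] => []
  | b :: bs => pvZwOf b :: pvTailA bs

-- A's main for-loop: append the cover char, then, if bits remain, one zero-width char
def pvMainA : List Char → List Char → List Char
  | [], bits => pvTailA bits
  | c :: cs, [] => c :: pvMainA cs []
  | c :: cs, b :: bs => c :: pvZwOf b :: pvMainA cs bs

def hide_text (cover_text : String) (secret_text : String) : String :=
  let binary_secret := (secret_text.toList.map pvBits8).flatten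
  String.mk (pvMainA cover_text.toList binary_secret)

-- ===== PORT B =====
-- B's inner loop 'for k in range(7,-1,-1)': arg n counts the remaining bit positions,
-- so the n+1 step handles bit index n; '(code >> k) & 1' ported as (code >>> k) % 2.
-- Returns (emitted chunk, cover characters the iterator has not yielded yet).
def pvEmitBits (code : Nat) : Nat → List Char → List Char × List Char
  | 0, cov => ([], cov)
  | n + 1, cov =>
      let zw := if (code >>> n) % 2 = 1 then pvZWNJ else pvZWSP
      match cov with
      | [] => let r := pvEmitBits code n []
              (zw :: r.1, r.2)
      | c :: cs => let r := pvEmitBits code n cs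
              (c :: zw :: r.1, r.2)

-- B's outer loop over secret characters; 'out.extend(it)' is the nil case's cov
def pvMainB : List Char → List Char → List Char
  | [], cov => cov
  | s :: ss, cov =>
      let r := pvEmitBits s.toNat 8 cov
      r.1 ++ pvMainB ss r.2

def hide_text_alt (cover_text : String) (secret_text : String) : String :=
  String.mk (pvMainB secret_text.toList cover_text.toList)

-- ===== PRECONDITION & SPEC =====
def Spec_hide_text (cover_text : String) (secret_text : String) (out : String) : Prop := out = hide_text_alt cover_text secret_text
instance (cover_text : String) (secret_text : String) (out : String) : Decidable (Spec_hide_text cover_text secret_text out) := by unfold Spec_hide_text; infer_instance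

-- ===== CLAIM (what is proved, stated in full; the proofs are below) =====
def Claim_equal_hide_text : Prop := ∀ (cover_text : String) (secret_text : String), Dom_hide_text cover_text secret_text → Spec_hide_text cover_text secret_text (hide_text cover_text secret_text)

-- ===== LEMMAS AND PROOFS =====

-- B's bit chars, most significant first (bits n-1 .. 0 of code)
def pvBitsN : Nat → Nat → List Char
  | 0, _ => []
  | n + 1, code => (if (code >>> n) % 2 = 1 then '1' else '0') :: pvBitsN n code

theorem pvBits8_eq (c : Char) : pvBits8 c = pvBitsN 8 c.toNat := by
  simp [pvBits8, List.range_succ, pvBitsN, Nat.shiftRight_eq_div_pow]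

theorem pvMainA_nil_bits (cov : List Char) : pvMainA cov [] = cov := by
  induction cov with
  | nil => rfl
  | cons c cs ih => simp [pvMainA, ih]

theorem pvEmit_eq (n code : Nat) (cov bs : List Char) :
    pvMainA cov (pvBitsN n code ++ bs)
      = (pvEmitBits code n cov).1 ++ pvMainA (pvEmitBits code n cov).2 bs := by
  induction n generalizing cov with
  | zero => simp [pvBitsN, pvEmitBits]
  | succ n ih =>
    cases cov with
    | nil =>
      simp only [pvBitsN, pvEmitBits, List.cons_append, pvMainA, pvTailA]
      rw [show pvTailA (pvBitsN n code ++ bs) = pvMainA [] (pvBitsN n code ++ bs) from rfl,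
        ih []]
      split_ifs <;> simp_all [pvZwOf]
    | cons c cs =>
      simp only [pvBitsN, pvEmitBits, List.cons_append, pvMainA, pvZwOf]
      rw [ih cs]
      split_ifs <;> simp_all

theorem pvMain_eq (ss cov : List Char) :
    pvMainA cov ((ss.map pvBits8).flatten) = pvMainB ss cov := by
  induction ss generalizing cov with
  | nil => simp [pvMainB, pvMainA_nil_bits]
  | cons s ss ih =>
    simp only [List.map_cons, List.flatten_cons, pvMainB, pvBits8_eq]
    rw [pvEmit_eq, ih]

-- ===== VERDICT (by name: the statement is the Claim_ definition above) =====
theorem hide_text_spec : Claim_equal_hide_text := by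
  intro cover_text secret_text _
  show hide_text cover_text secret_text = hide_text_alt cover_text secret_text
  unfold hide_text hide_text_alt
  exact congrArg String.mk (pvMain_eq _ _)
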